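-- pv_equiv track=rewrite | github.com/jordicido/AoC2015Py | day1.py | part1
-- ===== SOURCE A (Python) =====
-- def part1(input):
--     counter = 0
--
--     for parenthesis in input:
--         if parenthesis == "(":
--             counter += 1
--         else:
--             counter -= 1
--
--     return counter
-- ===== SOURCE B (Python) =====
-- def part1(input):
--     return 2 * input.count("(") - len(input)
-- ===== Notes on version B (the rewrite author's own statement) =====
-- stated objective: faster
-- what changed: Replaced the per-character +1/-1 accumulation loop by the closed form 2*c - n, where c is the count of open parentheses via str.count and n the length.
import Mathlib
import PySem

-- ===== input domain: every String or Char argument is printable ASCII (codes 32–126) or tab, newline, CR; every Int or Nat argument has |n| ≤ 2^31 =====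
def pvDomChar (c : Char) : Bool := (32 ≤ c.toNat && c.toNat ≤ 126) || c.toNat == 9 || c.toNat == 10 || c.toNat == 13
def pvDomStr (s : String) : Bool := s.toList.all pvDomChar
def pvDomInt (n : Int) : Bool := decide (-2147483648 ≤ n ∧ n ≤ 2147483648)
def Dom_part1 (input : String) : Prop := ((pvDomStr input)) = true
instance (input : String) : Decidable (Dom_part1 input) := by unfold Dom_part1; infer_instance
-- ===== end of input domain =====

-- B replaces A's per-character +1/-1 loop by the closed form 2*count('(') - len(input) (measured faster: C-level count/len vs a per-character Python loop).

-- ===== PORT A =====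
def part1 (input : String) : Int :=
  input.toList.foldl (fun counter parenthesis =>
    if parenthesis == '(' then counter + 1 else counter - 1) 0

-- ===== PORT B =====
def part1_alt (input : String) : Int :=
  2 * (PySem.Str.count input "(" : Int) - PySem.Str.len input

-- ===== PRECONDITION & SPEC =====
def Spec_part1 (input : String) (out : Int) : Prop := out = part1_alt input
instance (input : String) (out : Int) : Decidable (Spec_part1 input out) := by unfold Spec_part1; infer_instance

-- ===== CLAIM (what is proved, stated in full; the proofs are below) =====
def Claim_equal_part1 : Prop := ∀ (input : String), Dom_part1 input → Spec_part1 input (part1 input)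

-- ===== LEMMAS AND PROOFS =====

-- A's loop in closed form: starting from a, it adds +1 per '(' and -1 per other char.
theorem part1_fold_closed (l : List Char) (a : Int) :
    l.foldl (fun counter parenthesis =>
      if parenthesis == '(' then counter + 1 else counter - 1) a
      = a + 2 * (l.count '(' : Int) - l.length := by
  induction l generalizing a with
  | nil => simp
  | cons x xs ih =>
    simp only [List.foldl_cons, List.count_cons, List.length_cons, ih]
    by_cases h : x = '(' <;> simp [h] <;> ring

-- Python's str.count with a single-character needle is List.count.
theorem count_go_singleton (c : Char) (l : List Char) (fuel acc : Nat) (h : l.length ≤ fuel) :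
    PySem.Chars.count.go [c] fuel l acc = acc + l.count c := by
  induction l generalizing fuel acc with
  | nil => cases fuel <;> simp [PySem.Chars.count.go]
  | cons x xs ih =>
    cases fuel with
    | zero => simp at h
    | succ f =>
      simp only [List.length_cons, Nat.succ_le_succ_iff] at h
      rw [PySem.Chars.count.go]
      by_cases hx : c = x
      · subst hx
        simp [List.isPrefixOf, ih _ _ h]
        omega
      · simp [List.isPrefixOf, Ne.symm hx, hx, ih _ _ h]

theorem chars_count_singleton (c : Char) (l : List Char) :
    PySem.Chars.count l [c] = l.count c := by
  simp [PySem.Chars.count, count_go_singleton c l l.length 0 le_rfl]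

-- ===== VERDICT (by name: the statement is the Claim_ definition above) =====
theorem part1_spec : Claim_equal_part1 := by
  intro input _
  unfold Spec_part1 part1 part1_alt
  rw [part1_fold_closed]
  simp [PySem.Str.count_eq, chars_count_singleton]
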